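-- pv_equiv track=rewrite | github.com/illiaxpwnz/goit-pnc-hw-02 | permutation-2.py | simple_permutation_encrypt
-- ===== SOURCE A (Python) =====
-- def create_key_sequence(key):
--     key = key.upper()
--     sorted_key = sorted(list(key))
--     key_sequence = []
--     for char in key:
--         index = sorted_key.index(char) + 1
--         key_sequence.append(index)
--         sorted_key[index - 1] = None  # Уникаємо дублювання
--     return key_sequence
--
-- def simple_permutation_encrypt(text, key):
--     key_sequence = create_key_sequence(key)
--     key_len = len(key_sequence)
--     text_blocks = [text[i:i+key_len] for i in range(0, len(text), key_len)]
--
--     encrypted_text = []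
--
--     for block in text_blocks:
--         block = list(block)
--         while len(block) < key_len:
--             block.append(' ')  # Доповнюємо пробілами для повного блоку
--         encrypted_block = [''] * key_len
--         for i, k in enumerate(key_sequence):
--             encrypted_block[k - 1] = block[i]
--         encrypted_text.append(''.join(encrypted_block))
--
--     return ''.join(encrypted_text)
-- ===== SOURCE B (Python) =====
-- def simple_permutation_encrypt(text, key):
--     u = key.upper()
--     n = len(u)
--     # inverse permutation: inv[r] = source column for output position r,
--     # where r is the counting rank of column i (no sorting, no marking)
--     inv = [0] * n
--     for i, c in enumerate(u):
--         r = sum(1 for d in u if d < c) + sum(1 for d in u[:i] if d == c)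
--         inv[r] = i
--     out = []
--     for start in range(0, len(text), n):
--         block = text[start:start + n].ljust(n)
--         out.append(''.join(block[inv[j]] for j in range(n)))
--     return ''.join(out)
-- ===== Notes on version B (the rewrite author's own statement) =====
-- stated objective: alternative
-- what changed: Replaces A's sort-then-index-and-mark key ranking and per-block scatter into a preallocated list by a sort-free counting rank (smaller-count plus earlier-equal-count), a single inverse permutation built once, and per-block gathering block[inv[j]] with ljust padding.
import Mathlib
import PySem

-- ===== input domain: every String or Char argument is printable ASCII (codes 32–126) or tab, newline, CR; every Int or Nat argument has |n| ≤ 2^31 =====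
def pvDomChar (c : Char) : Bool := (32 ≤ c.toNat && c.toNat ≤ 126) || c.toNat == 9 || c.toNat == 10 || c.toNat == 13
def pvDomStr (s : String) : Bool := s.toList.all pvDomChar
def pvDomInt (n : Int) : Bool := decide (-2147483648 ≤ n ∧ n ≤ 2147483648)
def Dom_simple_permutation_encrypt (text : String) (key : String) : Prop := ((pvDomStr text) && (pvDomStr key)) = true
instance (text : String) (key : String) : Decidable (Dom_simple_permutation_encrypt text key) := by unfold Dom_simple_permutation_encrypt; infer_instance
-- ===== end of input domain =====

-- B replaces A's sort-then-index-and-mark key ranking and per-block scatter by a sort-free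
-- counting rank, one inverse permutation built once, and per-block gathering (alternative decomposition).

-- B replaces A's sort-then-index-and-mark key ranking and per-block scatter by a sort-free
-- counting rank, one inverse permutation built once, and per-block gathering (alternative decomposition).

-- ===== PORT A =====
-- the for-loop of create_key_sequence; Python's '.index' always succeeds here (the masked sorted
-- key always still contains the character being looked up), so '.getD 0' is never the taken branch
def cksLoop : List Char → List (Option Char) → List Int → List Int
  | [], _, acc => acc
  | c :: t, s, acc =>
      let idx : Nat := (PySem.List.index? s (some c)).getD 0
      cksLoop t (s.set idx none) (acc ++ [(idx : Int) + 1])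

def create_key_sequence (key : List Char) : List Int :=
  let keyU := PySem.Chars.upper key
  cksLoop keyU ((PySem.List.sorted keyU (fun c => c) false).map some) []

def simple_permutation_encrypt (text : String) (key : String) : String :=
  let key_sequence := create_key_sequence key.toList
  let key_len := key_sequence.length
  let tl := text.toList
  let text_blocks := (PySem.List.pyRange 0 tl.length (key_len : Int)).map
      (fun i => PySem.List.slice tl (some i) (some (i + (key_len : Int))))
  let encrypted_text := text_blocks.map (fun b =>
      let block := b ++ List.replicate (key_len - b.length) ' '
      let eb := (PySem.List.enumerate key_sequence 0).foldl
          (fun eb p => PySem.List.pySetD eb (p.2 - 1) [PySem.List.pyGetD block p.1 ' '])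
          (List.replicate key_len ([] : List Char))
      eb.flatten)
  String.ofList encrypted_text.flatten

-- ===== PORT B =====
def simple_permutation_encrypt_alt (text : String) (key : String) : String :=
  let u := PySem.Chars.upper key.toList
  let n := u.length
  let inv := (PySem.List.enumerate u 0).foldl
      (fun inv p =>
        let r := (u.countP (fun d => decide (d < p.2))) +
                 ((PySem.List.slice u none (some p.1)).countP (fun d => d == p.2))
        inv.set r p.1) (List.replicate n (0 : Int))
  let out := (PySem.List.pyRange 0 text.toList.length (n : Int)).map (fun start =>
      let block := PySem.List.slice text.toList (some start) (some (start + (n : Int)))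
      let block := block ++ List.replicate (n - block.length) ' '
      (List.range n).map (fun (j : Nat) => PySem.List.pyGetD block (PySem.List.pyGetD inv (j : Int) 0) ' '))
  String.ofList out.flatten

-- ===== PRECONDITION & SPEC =====
-- Pre_ excludes exactly the empty key, on which Python A raises ValueError (range() step 0).
def Pre_simple_permutation_encrypt (text : String) (key : String) : Prop := key ≠ ""
instance (text : String) (key : String) : Decidable (Pre_simple_permutation_encrypt text key) := by unfold Pre_simple_permutation_encrypt; infer_instance
def pvWitness_simple_permutation_encrypt : String × String := ("HELLO WORLD", "KeyK")

def Spec_simple_permutation_encrypt (text : String) (key : String) (out : String) : Prop := out = simple_permutation_encrypt_alt text key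
instance (text : String) (key : String) (out : String) : Decidable (Spec_simple_permutation_encrypt text key out) := by unfold Spec_simple_permutation_encrypt; infer_instance

-- ===== CLAIM (what is proved, stated in full; the proofs are below) =====
def Claim_equal_simple_permutation_encrypt : Prop := ∀ (text : String) (key : String), Dom_simple_permutation_encrypt text key → Pre_simple_permutation_encrypt text key → Spec_simple_permutation_encrypt text key (simple_permutation_encrypt text key)

-- ===== LEMMAS AND PROOFS =====

-- the counting rank of column i of the upper-cased key u: columns holding a smaller character,
-- plus earlier columns holding the same character (= 0-based position of column i after stable sorting)
def rnk (u : List Char) (i : Nat) : Nat :=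
  u.countP (fun d => decide (d < u.getD i ' ')) + (u.take i).countP (fun d => d == u.getD i ' ')

-- A's sorted_key with, for each character c, its first (f c) occurrences overwritten by None
def maskIdx : List Char → (Char → Nat) → List (Option Char)
  | [], _ => []
  | c :: t, f =>
      if f c = 0 then some c :: maskIdx t f
      else none :: maskIdx t (fun d => if d = c then f c - 1 else f d)

theorem maskIdx_zero (l : List Char) : maskIdx l (fun _ => 0) = l.map some := by
  induction l with
  | nil => rfl
  | cons c t ih => simp [maskIdx, ih]

theorem maskIdx_index (l : List Char) (f : Char → Nat) (c : Char)
    (hs : l.Pairwise (· ≤ ·)) (h : f c < l.count c) :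
    PySem.List.index? (maskIdx l f) (some c) =
      some (l.countP (fun d => decide (d < c)) + f c) := by
  induction l generalizing f with
  | nil => simp at h
  | cons x t ih =>
    rw [List.pairwise_cons] at hs
    obtain ⟨hall, hst⟩ := hs
    have hcnt : (x :: t).count c = t.count c + if x == c then 1 else 0 := by
      simp [List.count_cons]
    by_cases hxc : x = c
    · subst hxc
      have htail0 : t.countP (fun d => decide (d < x)) = 0 := by
        refine List.countP_eq_zero.mpr ?_
        intro y hy
        simp [not_lt.mpr (hall y hy)]
      by_cases hfx : f x = 0
      · rw [show maskIdx (x :: t) f = some x :: maskIdx t f by simp [maskIdx, hfx]]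
        rw [PySem.List.index?_cons_self]
        simp [List.countP_cons, htail0, hfx]
      · rw [show maskIdx (x :: t) f = none :: maskIdx t (fun d => if d = x then f x - 1 else f d) by simp [maskIdx, hfx]]
        rw [PySem.List.index?_cons_of_ne _ (by simp)]
        have hc2 : (x :: t).count x = t.count x + 1 := by simp [List.count_cons]
        have hlt : (fun d => if d = x then f x - 1 else f d) x < t.count x := by
          show (if x = x then f x - 1 else f x) < t.count x
          rw [if_pos rfl]; omega
        rw [ih _ hst hlt]
        simp [List.countP_cons]
        omega
    · have hxc' : (x == c) = false := by simp [hxc]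
      rcases lt_or_gt_of_ne hxc with hlt | hgt
      · -- x < c
        have hcount : t.count c = (x :: t).count c := by simp [hcnt, hxc']
        have hhead : decide (x < c) = true := by simp [hlt]
        by_cases hfx : f x = 0
        · rw [show maskIdx (x :: t) f = some x :: maskIdx t f by simp [maskIdx, hfx]]
          rw [PySem.List.index?_cons_of_ne _ (by simp [hxc])]
          rw [ih _ hst (by omega)]
          simp [List.countP_cons, hhead]
          omega
        · rw [show maskIdx (x :: t) f = none :: maskIdx t (fun d => if d = x then f x - 1 else f d) by simp [maskIdx, hfx]]
          rw [PySem.List.index?_cons_of_ne _ (by simp)]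
          have hlt2 : (fun d => if d = x then f x - 1 else f d) c < t.count c := by
            simp [show c ≠ x from fun hh => hxc hh.symm]
            omega
          rw [ih _ hst hlt2]
          simp [List.countP_cons, hhead, show c ≠ x from fun hh => hxc hh.symm]
          omega
      · -- c < x : c cannot occur, contradiction
        exfalso
        have : t.count c = 0 := by
          refine List.count_eq_zero.mpr ?_
          intro hc
          exact absurd (hall c hc) (not_le.mpr hgt)
        simp [hcnt, hxc', this] at h

theorem maskIdx_cons_pos (x : Char) (t : List Char) (f : Char → Nat) (h : f x = 0) :
    maskIdx (x :: t) f = some x :: maskIdx t f := by simp [maskIdx, h]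

theorem maskIdx_cons_neg (x : Char) (t : List Char) (f : Char → Nat) (h : f x ≠ 0) :
    maskIdx (x :: t) f = none :: maskIdx t (fun d => if d = x then f x - 1 else f d) := by
  simp [maskIdx, h]

theorem maskIdx_set (l : List Char) (f : Char → Nat) (c : Char)
    (hs : l.Pairwise (· ≤ ·)) (h : f c < l.count c) :
    (maskIdx l f).set (l.countP (fun d => decide (d < c)) + f c) none =
      maskIdx l (fun d => if d = c then f c + 1 else f d) := by
  induction l generalizing f with
  | nil => simp at h
  | cons x t ih =>
    rw [List.pairwise_cons] at hs
    obtain ⟨hall, hst⟩ := hs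
    by_cases hxc : x = c
    · subst hxc
      have htail0 : t.countP (fun d => decide (d < x)) = 0 := by
        refine List.countP_eq_zero.mpr ?_
        intro y hy
        simp [not_lt.mpr (hall y hy)]
      have hc2 : (x :: t).count x = t.count x + 1 := by simp [List.count_cons]
      have hhead : ((x :: t).countP (fun d => decide (d < x))) = 0 := by
        simp [List.countP_cons, htail0]
      rw [hhead]
      rw [maskIdx_cons_neg x t (fun d => if d = x then f x + 1 else f d) (by simp)]
      by_cases hfx : f x = 0
      · rw [maskIdx_cons_pos x t f hfx]
        rw [show (0 : Nat) + f x = 0 by omega]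
        rw [List.set_cons_zero]
        congr 1
        rw [show (fun d => if d = x then (if x = x then f x + 1 else f x) - 1
              else if d = x then f x + 1 else f d) = f from funext fun d => by
          by_cases hd : d = x <;> simp [hd, hfx]]
      · rw [maskIdx_cons_neg x t f hfx]
        rw [show (0 : Nat) + f x = (f x - 1) + 1 by omega]
        rw [List.set_cons_succ]
        congr 1
        have hlt : (fun d => if d = x then f x - 1 else f d) x < t.count x := by
          show (if x = x then f x - 1 else f x) < t.count x
          rw [if_pos rfl]; omega
        have := ih (fun d => if d = x then f x - 1 else f d) hst hlt
        rw [show t.countP (fun d => decide (d < x)) +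
            (fun d => if d = x then f x - 1 else f d) x = f x - 1 by
          show t.countP (fun d => decide (d < x)) + (if x = x then f x - 1 else f x) = f x - 1
          rw [if_pos rfl]; omega] at this
        rw [this]
        refine congrArg (maskIdx t) (funext fun d => ?_)
        by_cases hd : d = x <;> simp [hd] <;> omega
    · have hxc' : (x == c) = false := by simp [hxc]
      have hcnt : (x :: t).count c = t.count c := by simp [List.count_cons, hxc']
      rcases lt_or_gt_of_ne hxc with hlt | hgt
      · have hhead : ((x :: t).countP (fun d => decide (d < c))) =
            t.countP (fun d => decide (d < c)) + 1 := by
          simp [List.countP_cons, hlt]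
        rw [hhead]
        rw [show t.countP (fun d => decide (d < c)) + 1 + f c =
            (t.countP (fun d => decide (d < c)) + f c) + 1 by omega]
        by_cases hfx : f x = 0
        · rw [maskIdx_cons_pos x t f hfx]
          rw [List.set_cons_succ]
          rw [ih f hst (by omega)]
          rw [maskIdx_cons_pos x t (fun d => if d = c then f c + 1 else f d)
            (by simp [hxc, hfx])]
        · rw [maskIdx_cons_neg x t f hfx]
          rw [List.set_cons_succ]
          have hfc : (fun d => if d = x then f x - 1 else f d) c < t.count c := by
            show (if c = x then f x - 1 else f c) < t.count c
            rw [if_neg (fun hh => hxc hh.symm)]; omega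
          have := ih (fun d => if d = x then f x - 1 else f d) hst hfc
          rw [show t.countP (fun d => decide (d < c)) +
              (fun d => if d = x then f x - 1 else f d) c =
              t.countP (fun d => decide (d < c)) + f c by
            show t.countP (fun d => decide (d < c)) + (if c = x then f x - 1 else f c) = _
            rw [if_neg (fun hh => hxc hh.symm)]] at this
          rw [this]
          rw [maskIdx_cons_neg x t (fun d => if d = c then f c + 1 else f d)
            (by simp [hxc, hfx])]
          refine congrArg (none :: maskIdx t ·) (funext fun d => ?_)
          by_cases hd : d = x
          · simp [hd, hxc]
          · by_cases hdc : d = c <;>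
              simp [hd, hdc, hxc, show ¬ c = x from fun hh => hxc hh.symm]
      · exfalso
        have : t.count c = 0 := by
          refine List.count_eq_zero.mpr ?_
          intro hc
          exact absurd (hall c hc) (not_le.mpr hgt)
        omega

theorem cksLoop_spec (u : List Char) : ∀ (rest p : List Char) (acc : List Int),
    u = p ++ rest →
    cksLoop rest (maskIdx (PySem.List.sorted u (fun c => c) false) (fun c => p.count c)) acc =
      acc ++ (List.range rest.length).map (fun j => ((rnk u (p.length + j) : Nat) : Int) + 1) := by
  intro rest
  induction rest with
  | nil => intro p acc h; simp [cksLoop]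
  | cons c t ih =>
    intro p acc hu
    have hs : (PySem.List.sorted u (fun c => c) false).Pairwise (· ≤ ·) := by
      have := PySem.List.sorted_pairwise u (fun c => c)
      simpa using this
    have hperm : (PySem.List.sorted u (fun c => c) false).Perm u :=
      PySem.List.sorted_perm u (fun c => c) false
    have hcount : p.count c < (PySem.List.sorted u (fun c => c) false).count c := by
      rw [hperm.count_eq]
      rw [hu, List.count_append, List.count_cons]
      simp
    have hidx := maskIdx_index (PySem.List.sorted u (fun c => c) false)
      (fun d => p.count d) c hs hcount
    have hset := maskIdx_set (PySem.List.sorted u (fun c => c) false)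
      (fun d => p.count d) c hs hcount
    have hcP : (PySem.List.sorted u (fun c => c) false).countP (fun d => decide (d < c)) =
        u.countP (fun d => decide (d < c)) := hperm.countP_eq _
    rw [hcP] at hidx hset
    have hfun : (fun d => if d = c then p.count c + 1 else p.count d) =
        (fun d => (p ++ [c]).count d) := by
      funext d
      by_cases hd : d = c
      · subst hd; simp [List.count_append, List.count_cons]
      · simp [List.count_append, hd, show ¬ c = d from fun hh => hd hh.symm]
    rw [hfun] at hset
    show cksLoop (c :: t) _ _ = _
    rw [cksLoop]
    rw [hidx]
    simp only [Option.getD_some]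
    rw [hset]
    rw [ih (p ++ [c]) _ (by rw [hu, List.append_assoc]; rfl)]
    -- now the accumulator algebra
    have hchar : u.getD p.length ' ' = c := by
      rw [List.getD_eq_getElem?_getD, hu]
      simp
    have htake : u.take p.length = p := by rw [hu]; exact List.take_left' rfl
    have hv0 : rnk u p.length = u.countP (fun d => decide (d < c)) + p.count c := by
      rw [rnk, hchar, htake, List.count_eq_countP]
    rw [List.length_cons, List.range_succ_eq_map]
    rw [List.map_cons, List.map_map]
    simp only [List.length_append, List.length_cons, List.length_nil]
    rw [List.append_assoc]
    congr 1
    rw [Nat.add_zero, ← hv0]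
    show ([(_ : Int)] ++ _) = _
    rw [List.singleton_append]
    congr 1
    apply List.map_congr_left
    intro j _
    have : p.length + 1 + j = p.length + (j + 1) := by omega
    rw [Function.comp_apply, this]

theorem countP_lt_add_eq_le_length (c : Char) (l : List Char) :
    l.countP (fun d => decide (d < c)) + l.countP (fun d => d == c) ≤ l.length := by
  induction l with
  | nil => simp
  | cons x t ih =>
    simp only [List.countP_cons, List.length_cons]
    by_cases hx : x < c
    · simp [hx, show ¬ (x == c) = true by simp; exact ne_of_lt hx]; omega
    · by_cases he : (x == c) = true <;> simp [hx, he] <;> omega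

theorem countP_lt_add_eq_le1 {c c' : Char} (h : c < c') (l : List Char) :
    l.countP (fun d => decide (d < c)) + l.countP (fun d => d == c) ≤
      l.countP (fun d => decide (d < c')) := by
  induction l with
  | nil => simp
  | cons x t ih =>
    simp only [List.countP_cons]
    by_cases hx : x < c
    · have h1 : x < c' := lt_trans hx h
      have h2 : (x == c) = false := by simp [ne_of_lt hx]
      simp [hx, h1, h2]; omega
    · by_cases he : x = c
      · subst he
        simp [h]; omega
      · have h2 : (x == c) = false := by simp [he]
        simp [hx, h2]
        by_cases h3 : x < c' <;> simp [h3] <;> omega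

theorem countP_take_lt (u : List Char) (i : Nat) (hi : i < u.length)
    (q : Char → Bool) (hq : q (u.getD i ' ') = true) :
    (u.take i).countP q < u.countP q := by
  have hsplit : u.countP q = (u.take i).countP q + (u.drop i).countP q := by
    rw [← List.countP_append, List.take_append_drop]
  have hdrop : u.drop i = u[i] :: u.drop (i + 1) := (List.getElem_cons_drop hi).symm
  have hg : u.getD i ' ' = u[i] := List.getD_eq_getElem u ' ' hi
  rw [hg] at hq
  rw [hdrop, List.countP_cons, hq] at hsplit
  simp at hsplit
  omega

theorem countP_take_succ (u : List Char) (i : Nat) (hi : i < u.length) (q : Char → Bool) :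
    (u.take (i + 1)).countP q = (u.take i).countP q + (if q u[i] then 1 else 0) := by
  rw [List.take_add_one, List.countP_append]
  simp [List.getElem?_eq_getElem hi, List.countP_cons]

theorem countP_take_le (u : List Char) {i i' : Nat} (h : i ≤ i') (q : Char → Bool) :
    (u.take i).countP q ≤ (u.take i').countP q := by
  rw [show i' = i + (i' - i) by omega, List.take_add, List.countP_append]
  omega

theorem rnk_lt (u : List Char) (i : Nat) (hi : i < u.length) : rnk u i < u.length := by
  have h1 := countP_take_lt u i hi (fun d => d == u.getD i ' ')
    (by simp [List.getD_eq_getElem?_getD, List.getElem?_eq_getElem hi])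
  have h2 := countP_lt_add_eq_le_length (u.getD i ' ') u
  rw [rnk]; omega

theorem rnk_lt_of_char_lt (u : List Char) {i i' : Nat} (hi : i < u.length)
    (hi' : i' < u.length) (hcc : u.getD i ' ' < u.getD i' ' ') : rnk u i < rnk u i' := by
  have h1 := countP_take_lt u i hi (fun d => d == u.getD i ' ')
    (by simp [List.getD_eq_getElem?_getD, List.getElem?_eq_getElem hi])
  have h2 := countP_lt_add_eq_le1 hcc u
  rw [rnk, rnk]; omega

theorem rnk_lt_of_char_eq (u : List Char) {i i' : Nat} (h : i < i') (hi' : i' < u.length)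
    (hcc : u.getD i ' ' = u.getD i' ' ') : rnk u i < rnk u i' := by
  have hi : i < u.length := lt_trans h hi'
  have hsucc := countP_take_succ u i hi (fun d => d == u.getD i ' ')
  have hmono := countP_take_le u (show i + 1 ≤ i' by omega) (fun d => d == u.getD i ' ')
  have hq : (u[i] == u.getD i ' ') = true := by
    simp [List.getD_eq_getElem?_getD, List.getElem?_eq_getElem hi]
  rw [hq] at hsucc
  rw [rnk, rnk, ← hcc]
  simp only [if_pos] at hsucc
  omega

theorem rnk_ne (u : List Char) {i i' : Nat} (hi : i < u.length) (hi' : i' < u.length)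
    (hne : i ≠ i') : rnk u i ≠ rnk u i' := by
  rcases lt_trichotomy (u.getD i ' ') (u.getD i' ' ') with hc | hc | hc
  · exact Nat.ne_of_lt (rnk_lt_of_char_lt u hi hi' hc)
  · rcases lt_or_gt_of_ne hne with hii | hii
    · exact Nat.ne_of_lt (rnk_lt_of_char_eq u hii hi' hc)
    · exact (Nat.ne_of_lt (rnk_lt_of_char_eq u hii hi hc.symm)).symm
  · exact (Nat.ne_of_lt (rnk_lt_of_char_lt u hi' hi hc)).symm

theorem rnk_surj (u : List Char) (j : Nat) (hj : j < u.length) :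
    ∃ i, i < u.length ∧ rnk u i = j := by
  let e : Fin u.length → Fin u.length := fun i => ⟨rnk u i, rnk_lt u i i.isLt⟩
  have hinj : Function.Injective e := by
    intro a b hab
    by_contra hne
    exact rnk_ne u a.isLt b.isLt (fun hh => hne (Fin.ext hh)) (congrArg Fin.val hab)
  have hsurj : Function.Surjective e := Finite.injective_iff_surjective.mp hinj
  obtain ⟨i, hi⟩ := hsurj ⟨j, hj⟩
  exact ⟨i, i.isLt, congrArg Fin.val hi⟩

theorem foldl_set_length {α β : Type} (L : List β) (f : β → Nat) (g : β → α)
    (init : List α) :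
    (L.foldl (fun l p => l.set (f p) (g p)) init).length = init.length := by
  induction L generalizing init with
  | nil => rfl
  | cons q t ih => simp [List.foldl_cons, ih]

theorem foldl_set_getD {α β : Type} (L : List β) (f : β → Nat) (g : β → α)
    (init : List α) (j : Nat) (d : α) (hj : j < init.length) :
    (L.foldl (fun l p => l.set (f p) (g p)) init).getD j d =
      match L.reverse.find? (fun p => f p == j) with
      | some p => g p
      | none => init.getD j d := by
  induction L using List.reverseRecOn with
  | nil => simp
  | append_singleton t q ih =>
    rw [List.foldl_append]
    simp only [List.foldl_cons, List.foldl_nil]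
    rw [List.reverse_append, List.reverse_singleton, List.singleton_append]
    have hlen := foldl_set_length t f g init
    by_cases hq : f q = j
    · rw [List.find?_cons_of_pos (h := by simp [hq])]
      rw [List.getD_eq_getElem?_getD, List.getElem?_set, hq]
      simp [hlen, hj]
    · rw [List.find?_cons_of_neg (h := by simp [hq])]
      rw [List.getD_eq_getElem?_getD, List.getElem?_set]
      rw [if_neg hq, ← List.getD_eq_getElem?_getD]
      exact ih

theorem find?_rnk (u : List Char) (j : Nat) (hj : j < u.length) :
    ∃ q, ((List.range u.length).reverse.find? (fun i => rnk u i == j)) = some q ∧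
      q < u.length ∧ rnk u q = j := by
  obtain ⟨i, hi, hri⟩ := rnk_surj u j hj
  have hmem : i ∈ (List.range u.length).reverse := by
    simp [List.mem_range, hi]
  have hsome : (((List.range u.length).reverse).find? (fun i => rnk u i == j)).isSome := by
    rw [List.find?_isSome]
    exact ⟨i, hmem, by simp [hri]⟩
  obtain ⟨q, hq⟩ := Option.isSome_iff_exists.mp hsome
  refine ⟨q, hq, ?_, ?_⟩
  · have := List.mem_of_find?_eq_some hq
    simpa [List.mem_range] using this
  · have := List.find?_some hq
    simpa using this

theorem create_key_sequence_eq (key : List Char) :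
    create_key_sequence key =
      (List.range (PySem.Chars.upper key).length).map
        (fun i => ((rnk (PySem.Chars.upper key) i : Nat) : Int) + 1) := by
  show cksLoop (PySem.Chars.upper key)
      ((PySem.List.sorted (PySem.Chars.upper key) (fun c => c) false).map some) [] = _
  rw [← maskIdx_zero]
  rw [show (fun _ => 0 : Char → Nat) = (fun c => List.count c ([] : List Char)) by
    funext d; simp]
  have := cksLoop_spec (PySem.Chars.upper key) (PySem.Chars.upper key) [] [] rfl
  simpa using this

theorem flatten_map_singleton {α β : Type} (l : List α) (h : α → β) :
    (l.map (fun x => [h x])).flatten = l.map h := by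
  induction l with
  | nil => rfl
  | cons x t ih => simp [ih]

theorem block_core (u : List Char) (P : List Char) :
    ((PySem.List.enumerate ((List.range u.length).map
          (fun i => ((rnk u i : Nat) : Int) + 1)) 0).foldl
        (fun eb p => PySem.List.pySetD eb (p.2 - 1) [PySem.List.pyGetD P p.1 ' '])
        (List.replicate u.length ([] : List Char))).flatten
      = (List.range u.length).map (fun (j : Nat) => PySem.List.pyGetD P
          (PySem.List.pyGetD ((PySem.List.enumerate u 0).foldl
            (fun inv p => inv.set ((u.countP (fun d => decide (d < p.2))) +
              ((PySem.List.slice u none (some p.1)).countP (fun d => d == p.2))) p.1)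
            (List.replicate u.length (0 : Int))) (j : Int) 0) ' ') := by
  -- Step 1: A's scatter as a fold over List.range
  have hA : (PySem.List.enumerate ((List.range u.length).map
          (fun i => ((rnk u i : Nat) : Int) + 1)) 0).foldl
        (fun eb p => PySem.List.pySetD eb (p.2 - 1) [PySem.List.pyGetD P p.1 ' '])
        (List.replicate u.length ([] : List Char))
      = (List.range u.length).foldl
        (fun eb k => eb.set (rnk u k) [P.getD k ' ']) (List.replicate u.length []) := by
    rw [PySem.List.enumerate_eq_map_pyRange _ (0 : Int)]
    have hlen : PySem.List.len ((List.range u.length).map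
        (fun i => ((rnk u i : Nat) : Int) + 1)) = (u.length : Int) := by
      simp [PySem.List.len_eq]
    rw [hlen, PySem.List.pyRange_zero_natCast, List.map_map, List.foldl_map]
    apply PySem.List.foldl_congr_mem
    intro acc k hk
    rw [List.mem_range] at hk
    simp only [Function.comp_apply]
    rw [PySem.List.pyGetD_natCast, PySem.List.getD_map_range _ _ _ _ hk]
    rw [show ((rnk u k : Nat) : Int) + 1 - 1 = ((rnk u k : Nat) : Int) by ring]
    rw [PySem.List.pySetD_natCast, PySem.List.pyGetD_natCast]
  -- Step 2: B's inverse permutation as a fold over List.range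
  have hB : (PySem.List.enumerate u 0).foldl
        (fun inv p => inv.set ((u.countP (fun d => decide (d < p.2))) +
          ((PySem.List.slice u none (some p.1)).countP (fun d => d == p.2))) p.1)
        (List.replicate u.length (0 : Int))
      = (List.range u.length).foldl
        (fun inv k => inv.set (rnk u k) ((k : Nat) : Int))
        (List.replicate u.length (0 : Int)) := by
    rw [PySem.List.enumerate_eq_map_pyRange _ ' ']
    rw [show PySem.List.len u = (u.length : Int) by simp [PySem.List.len_eq]]
    rw [PySem.List.pyRange_zero_natCast, List.map_map, List.foldl_map]
    apply PySem.List.foldl_congr_mem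
    intro acc k hk
    rw [List.mem_range] at hk
    simp only [Function.comp_apply, PySem.List.pyGetD_natCast, PySem.List.slice_to_natCast]
    rfl
  rw [hA, hB]
  -- Step 3: pointwise comparison via the scatter-lookup lemma
  have hebl : ((List.range u.length).foldl
      (fun eb k => eb.set (rnk u k) [P.getD k ' ']) (List.replicate u.length [])).length
      = u.length := by
    rw [foldl_set_length]; simp
  have heb : (List.range u.length).foldl
      (fun eb k => eb.set (rnk u k) [P.getD k ' ']) (List.replicate u.length [])
      = (List.range u.length).map (fun j =>
          [P.getD ((((List.range u.length).reverse.find?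
              (fun i => rnk u i == j)).getD 0)) ' ']) := by
    apply List.ext_getElem
    · rw [hebl]; simp
    · intro j hj1 hj2
      rw [hebl] at hj1
      obtain ⟨q, hq, hqlt, hrq⟩ := find?_rnk u j hj1
      have key := foldl_set_getD (List.range u.length) (rnk u) (fun k => [P.getD k ' '])
        (List.replicate u.length []) j [] (by simp [hj1])
      beta_reduce at key
      rw [hq] at key
      have hjl : j < (List.foldl (fun eb k => eb.set (rnk u k) [P.getD k ' '])
          (List.replicate u.length []) (List.range u.length)).length := by
        rw [hebl]; exact hj1
      rw [← List.getD_eq_getElem _ [] hjl, key, List.getElem_map, List.getElem_range, hq]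
      simp
  rw [heb, flatten_map_singleton]
  apply List.map_congr_left
  intro j hj
  rw [List.mem_range] at hj
  obtain ⟨q, hq, hqlt, hrq⟩ := find?_rnk u j hj
  have hinv := foldl_set_getD (List.range u.length) (rnk u) (fun k => ((k : Nat) : Int))
    (List.replicate u.length (0 : Int)) j 0 (by simp [hj])
  beta_reduce at hinv
  rw [hq] at hinv
  rw [PySem.List.pyGetD_natCast, hinv]
  simp [PySem.List.pyGetD_natCast, hq]

theorem simple_permutation_encrypt_eq (text key : String) (hk : key ≠ "") :
    simple_permutation_encrypt text key = simple_permutation_encrypt_alt text key := by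
  have hklist : key.toList ≠ [] := fun h => hk (String.toList_eq_nil_iff.mp h)
  have hulen : (PySem.Chars.upper key.toList).length = key.toList.length := by
    simp [PySem.Chars.upper]
  have hnpos : 0 < (PySem.Chars.upper key.toList).length := by
    rw [hulen]
    exact List.length_pos_iff.mpr hklist
  simp only [simple_permutation_encrypt, simple_permutation_encrypt_alt,
    create_key_sequence_eq, List.length_map, List.length_range]
  congr 1
  refine congrArg List.flatten ?_
  rw [List.map_map]
  apply List.map_congr_left
  intro i hi
  simp only [Function.comp_apply]
  exact block_core (PySem.Chars.upper key.toList) _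

-- ===== VERDICT (by name: the statement is the Claim_ definition above) =====
theorem simple_permutation_encrypt_spec : Claim_equal_simple_permutation_encrypt := by
  intro text key _ hpre
  unfold Spec_simple_permutation_encrypt
  exact simple_permutation_encrypt_eq text key hpre
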